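-- pv_equiv track=rewrite | github.com/vtjeng/coding-contests | kick_start/2021/B/progression/progression.py | process
-- ===== SOURCE A (Python) =====
-- def longest_arithmetic_subarray(xs):
--     max_length = 2
--     # current candidate subarray is [i, j)
--     i = 0
--     for j in range(2, len(xs)):
--         if not (xs[j] - xs[j - 1] == xs[i + 1] - xs[i]):
--             cur_length = j - i
--             max_length = max(cur_length, max_length)
--             i = j - 1
--     return max(max_length, j + 1 - i)
--
-- def _mid_helper(xs, i):
--     d = (xs[i + 1] - xs[i - 1]) // 2
--     a = i - 1
--     b = i + 1
--     count = 3
--     while a > 0 and xs[a] - xs[a - 1] == d: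
--         a -= 1
--         count += 1
--     while b < len(xs) - 1 and xs[b + 1] - xs[b] == d:
--         b += 1
--         count += 1
--     return count
--
-- def process(xs):
--     n = len(xs)
--     if n <= 3:
--         # always possible to make an arithmetic progression of at least the length of the array
--         return n
--
--     return max(
--         min(n, longest_arithmetic_subarray(xs) + 1),
--         *[_mid_helper(xs, i) for i in range(1, len(xs) - 1)],
--     )
-- ===== SOURCE B (Python) =====
-- def _runs(d):
--     # run length of equal consecutive values ending at each index, in one scan
--     out = []
--     r = 0
--     prev = None
--     for v in d:
--         r = r + 1 if out and v == prev else 1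
--         out.append(r)
--         prev = v
--     return out
--
-- def process(xs):
--     n = len(xs)
--     if n <= 3:
--         return n
--     d = [b - a for a, b in zip(xs, xs[1:])]
--     E = _runs(d)            # run of equal diffs ending at k
--     S = _runs(d[::-1])[::-1]  # run of equal diffs starting at k
--     best = min(n, max(E) + 2)
--     for i in range(1, n - 1):
--         dd = (xs[i + 1] - xs[i - 1]) // 2
--         c = 3
--         if i >= 2 and d[i - 2] == dd:
--             c += E[i - 2]
--         if i <= n - 3 and d[i + 1] == dd:
--             c += S[i + 1]
--         if c > best:
--             best = c
--     return best
-- ===== Notes on version B (the rewrite author's own statement) =====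
-- stated objective: faster
-- what changed: A rescans left and right with two while-loops at every interior position; B precomputes per-index equal-difference run lengths (one forward scan, one backward scan) so each position is handled in O(1), and the longest-run loop collapses to max over the run table.
import Mathlib
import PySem

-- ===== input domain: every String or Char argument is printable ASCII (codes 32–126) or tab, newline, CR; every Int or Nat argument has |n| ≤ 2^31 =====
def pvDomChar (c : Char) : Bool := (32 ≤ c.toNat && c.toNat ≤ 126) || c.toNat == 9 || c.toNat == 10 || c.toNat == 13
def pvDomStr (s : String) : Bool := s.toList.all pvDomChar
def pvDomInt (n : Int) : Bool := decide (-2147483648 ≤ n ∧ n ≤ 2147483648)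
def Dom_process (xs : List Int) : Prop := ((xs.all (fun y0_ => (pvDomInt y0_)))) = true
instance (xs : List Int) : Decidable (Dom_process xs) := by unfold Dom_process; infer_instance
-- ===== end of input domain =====

-- B replaces A's per-position while-loop scans by two precomputed run-length tables, O(n) instead of O(n^2).

-- ===== PORT A =====
-- xs[i] for indices the programs only use in range (default never read)
def pvGetI (xs : List Int) (i : Int) : Int := PySem.List.pyGetD xs i 0

-- the for-loop of longest_arithmetic_subarray; state (max_length, i, j); Python's j leaks
-- out of the loop (NameError if the loop never ran — unreachable: process calls it only for n ≥ 4)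
def lasLoop (xs : List Int) : Int × Int × Int :=
  (PySem.List.pyRange 2 (PySem.List.len xs) 1).foldl
    (fun st j =>
      if ¬ (pvGetI xs j - pvGetI xs (j - 1) = pvGetI xs (st.2.1 + 1) - pvGetI xs st.2.1) then
        (max (j - st.2.1) st.1, j - 1, j)
      else (st.1, st.2.1, j))
    (2, 0, 0)

def las (xs : List Int) : Int :=
  let st := lasLoop xs
  max st.1 (st.2.2 + 1 - st.2.1)

-- first while loop of _mid_helper (returns the number of iterations, i.e. what it adds to count)
def midLeft (xs : List Int) (d : Int) (a : Int) : Int :=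
  if h : 0 < a then
    if pvGetI xs a - pvGetI xs (a - 1) = d then midLeft xs d (a - 1) + 1 else 0
  else 0
termination_by a.toNat
decreasing_by omega

-- second while loop of _mid_helper
def midRight (xs : List Int) (d : Int) (b : Int) : Int :=
  if h : b < PySem.List.len xs - 1 then
    if pvGetI xs (b + 1) - pvGetI xs b = d then midRight xs d (b + 1) + 1 else 0
  else 0
termination_by (PySem.List.len xs - 1 - b).toNat
decreasing_by simp [PySem.List.len_eq] at *; omega

def midHelper (xs : List Int) (i : Int) : Int :=
  let d := PySem.Int.floordiv (pvGetI xs (i + 1) - pvGetI xs (i - 1)) 2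
  3 + midLeft xs d (i - 1) + midRight xs d (i + 1)

def process (xs : List Int) : Int :=
  let n := PySem.List.len xs
  if n ≤ 3 then n
  else
    -- max(x, *[...]) = running max over the comprehension, seeded with x
    (PySem.List.pyRange 1 (n - 1) 1).foldl
      (fun acc i => max acc (midHelper xs i))
      (min n (las xs + 1))

-- ===== PORT B =====
-- _runs: one scan; `out and v == prev` ⟺ prev is some v (v == None is False in Python)
def runsGo (r : Int) (prev : Option Int) : List Int → List Int
  | [] => []
  | v :: t =>
      let r' := if prev = some v then r + 1 else 1
      r' :: runsGo r' (some v) t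

def runs (d : List Int) : List Int := runsGo 0 none d

def process_alt (xs : List Int) : Int :=
  let n := PySem.List.len xs
  if n ≤ 3 then n
  else
    let d := List.zipWith (fun a b => b - a) xs (List.drop 1 xs)
    let E := runs d
    let S := (runs d.reverse).reverse
    -- max(E): E is nonempty here (n ≥ 4), default never read
    let best := min n (((PySem.List.max? E (fun x => x)).getD 0) + 2)
    (PySem.List.pyRange 1 (n - 1) 1).foldl
      (fun best i =>
        let dd := PySem.Int.floordiv (pvGetI xs (i + 1) - pvGetI xs (i - 1)) 2
        let c : Int := 3
        let c := if 2 ≤ i ∧ pvGetI d (i - 2) = dd then c + pvGetI E (i - 2) else c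
        let c := if i ≤ n - 3 ∧ pvGetI d (i + 1) = dd then c + pvGetI S (i + 1) else c
        if c > best then c else best)
      best

-- ===== PRECONDITION & SPEC =====
def Spec_process (xs : List Int) (out : Int) : Prop := out = process_alt xs
instance (xs : List Int) (out : Int) : Decidable (Spec_process xs out) := by unfold Spec_process; infer_instance

-- ===== CLAIM (what is proved, stated in full; the proofs are below) =====
def Claim_equal_process : Prop := ∀ (xs : List Int), Dom_process xs → Spec_process xs (process xs)

-- ===== LEMMAS AND PROOFS =====

def cwe (d : Int) : List Int → Nat
  | [] => 0
  | x :: t => if x = d then cwe d t + 1 else 0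

def diffs (xs : List Int) : List Int := List.zipWith (fun a b => b - a) xs (List.drop 1 xs)

lemma length_diffs (xs : List Int) : (diffs xs).length = xs.length - 1 := by simp [diffs]

lemma pvGetI_diff (xs : List Int) (k : Nat) (hk : k + 1 < xs.length) :
    pvGetI xs (↑k + 1) - pvGetI xs ↑k = (diffs xs).getD k 0 := by
  have hd : k < (diffs xs).length := by rw [length_diffs]; omega
  have : (↑k + 1 : Int) = ↑(k+1) := by push_cast; ring
  rw [this]
  simp only [pvGetI, PySem.List.pyGetD_natCast]
  rw [List.getD_eq_getElem _ 0 hd, List.getD_eq_getElem _ 0 (by omega : k + 1 < xs.length),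
      List.getD_eq_getElem _ 0 (by omega : k < xs.length)]
  simp [diffs, List.getElem_zipWith]

lemma cwe_getD (d : Int) (l : List Int) (t : Nat) (ht : t < cwe d l) : l.getD t 0 = d := by
  induction l generalizing t with
  | nil => simp [cwe] at ht
  | cons x l ih =>
    simp only [cwe] at ht
    split at ht
    · cases t with
      | zero => simpa
      | succ t => simpa using ih t (by omega)
    · omega

lemma getD_reverse_take (l : List Int) (s t : Nat) (hs : s ≤ t) (ht : t < l.length) :
    ((l.take (t + 1)).reverse).getD s 0 = l.getD (t - s) 0 := by
  have h1 : (l.take (t+1)).length = t + 1 := by simp; omega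
  have h2 : s < (l.take (t+1)).reverse.length := by simp; omega
  rw [List.getD_eq_getElem _ 0 h2, List.getD_eq_getElem _ 0 (by omega : t - s < l.length)]
  rw [List.getElem_reverse]
  simp only [h1, List.getElem_take]
  simp

lemma reverse_take_succ (l : List Int) (k : Nat) (hk : k < l.length) :
    (l.take (k + 1)).reverse = l.getD k 0 :: (l.take k).reverse := by
  rw [List.take_succ_eq_append_getElem hk, List.reverse_append, List.getD_eq_getElem l 0 hk]
  simp

lemma midLeft_eq (xs : List Int) (d : Int) (aN : Nat) (ha : aN ≤ (diffs xs).length) :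
    midLeft xs d ↑aN = ↑(cwe d (((diffs xs).take aN).reverse)) := by
  induction aN with
  | zero => rw [midLeft]; simp [cwe]
  | succ a ih =>
    have hlen : a + 1 < xs.length := by have := length_diffs xs; omega
    have hda : a < (diffs xs).length := by omega
    rw [midLeft]
    have hpos : (0 : Int) < ↑(a + 1) := by push_cast; omega
    rw [dif_pos hpos]
    have hc : (↑(a + 1) : Int) - 1 = ↑a := by push_cast; ring
    have hd : pvGetI xs ↑(a + 1) - pvGetI xs ((↑(a+1) : Int) - 1) = (diffs xs).getD a 0 := by
      rw [hc, ← pvGetI_diff xs a hlen]; norm_num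
    rw [hd, reverse_take_succ _ _ hda]
    simp only [cwe]
    split <;> rename_i hx
    · rw [hc, ih (by omega)]; push_cast; ring
    · simp

lemma midRight_eq (xs : List Int) (d : Int) (bN : Nat) :
    midRight xs d ↑bN = ↑(cwe d ((diffs xs).drop bN)) := by
  have hlen := length_diffs xs
  generalize hk : (diffs xs).length - bN = k
  induction k generalizing bN with
  | zero =>
    have hb : (diffs xs).length ≤ bN := by omega
    rw [midRight, dif_neg (by simp [PySem.List.len_eq]; omega)]
    rw [List.drop_eq_nil_of_le hb]
    simp [cwe]
  | succ k ih =>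
    have hb : bN < (diffs xs).length := by omega
    have hx : bN + 1 < xs.length := by omega
    rw [midRight, dif_pos (by simp [PySem.List.len_eq]; omega)]
    rw [List.drop_eq_getElem_cons hb, ← List.getD_eq_getElem _ 0 hb]
    have hd : pvGetI xs (↑bN + 1) - pvGetI xs ↑bN = (diffs xs).getD bN 0 := pvGetI_diff xs bN hx
    rw [hd]
    simp only [cwe]
    split <;> rename_i hc
    · have : (↑bN : Int) + 1 = ↑(bN + 1) := by push_cast; ring
      rw [this, ih (bN + 1) (by omega)]
      push_cast; ring
    · simp

lemma length_runsGo (r : Int) (p : Option Int) (t : List Int) :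
    (runsGo r p t).length = t.length := by
  induction t generalizing r p with
  | nil => rfl
  | cons v t ih => simp [runsGo, ih]

lemma runsGo_step (c : List Int) (p v : Int) (hlast : c.getLast? = some p) :
    (if some p = some v then (↑(cwe p c.reverse) : Int) + 1 else 1)
      = ↑(cwe v ((c ++ [v]).reverse)) := by
  have hc : c ≠ [] := by intro h; simp [h] at hlast
  rw [List.reverse_append]
  simp only [List.reverse_cons, List.reverse_nil, List.nil_append, List.cons_append,
    List.nil_append, cwe, if_pos rfl]
  by_cases hv : p = v
  · rw [if_pos (by rw [hv]), hv]; push_cast; ring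
  · rw [if_neg (by simpa using hv)]
    have hrev : c.reverse.getD 0 0 = p := by
      rw [← List.head?_reverse] at hlast
      cases hr : c.reverse with
      | nil => simp [hr] at hlast
      | cons y ys => simp [hr] at hlast ⊢; exact hlast
    have : cwe v c.reverse = 0 := by
      cases hr : c.reverse with
      | nil => simp [cwe]
      | cons y ys =>
        have : y = p := by simpa [hr] using hrev
        simp [cwe, this, hv, Ne.symm hv]
    rw [this]
    simp

lemma runsGo_getD (t : List Int) (c : List Int) (p : Int) (k : Nat)
    (hk : k < t.length) (hlast : c.getLast? = some p) :
    (runsGo ↑(cwe p c.reverse) (some p) t).getD k 0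
      = ↑(cwe (t.getD k 0) ((c ++ t.take (k + 1)).reverse)) := by
  induction t generalizing c p k with
  | nil => simp at hk
  | cons v t ih =>
    simp only [runsGo]
    cases k with
    | zero =>
      simp only [List.getD_cons_zero, List.take_succ_cons, List.take_zero]
      exact runsGo_step c p v hlast
    | succ k =>
      simp only [List.getD_cons_succ, List.take_succ_cons]
      have hstep := runsGo_step c p v hlast
      rw [hstep, ih (c ++ [v]) v k (by simpa using hk) (by simp)]
      congr 2
      · simp [List.append_assoc]

lemma runs_getD (d : List Int) (k : Nat) (hk : k < d.length) :
    (runs d).getD k 0 = ↑(cwe (d.getD k 0) ((d.take (k + 1)).reverse)) := by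
  cases d with
  | nil => simp at hk
  | cons v t =>
    simp only [runs, runsGo, reduceIte]
    cases k with
    | zero => simp [cwe]
    | succ k =>
      simp only [List.getD_cons_succ, List.take_succ_cons]
      have h2 : (if (none : Option Int) = some v then (0:Int) + 1 else 1) = ↑(cwe v ([v].reverse)) := by
        simp [cwe]
      rw [h2, runsGo_getD t [v] v k (by simpa using hk) (by simp)]
      simp

lemma S_getD (d : List Int) (k : Nat) (hk : k < d.length) :
    ((runs d.reverse).reverse).getD k 0 = ↑(cwe (d.getD k 0) (d.drop k)) := by
  have hlR : (runs d.reverse).length = d.length := by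
    simp [runs, length_runsGo]
  have hk2 : k < (runs d.reverse).reverse.length := by simp [hlR]; omega
  have hk3 : d.length - 1 - k < (runs d.reverse).length := by omega
  rw [List.getD_eq_getElem _ 0 hk2, List.getElem_reverse, ← List.getD_eq_getElem _ 0 (by omega)]
  simp only [hlR]
  rw [runs_getD d.reverse (d.length - 1 - k) (by first | omega | (simp; omega))]
  have e1 : d.reverse.getD (d.length - 1 - k) 0 = d.getD k 0 := by
    rw [List.getD_eq_getElem _ 0 (by first | omega | (simp; omega)), List.getElem_reverse,
        ← List.getD_eq_getElem _ 0 (by first | omega | (simp; omega))]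
    congr 1
    first | omega | (simp; omega)
  have e2 : (d.reverse.take (d.length - 1 - k + 1)).reverse = d.drop k := by
    rw [List.take_reverse]
    simp only [List.reverse_reverse]
    congr 1
    first | omega | (simp; omega)
  rw [e1, e2]

lemma pvGetI_natCast (xs : List Int) (k : Nat) : pvGetI xs (↑k) = xs.getD k 0 := by
  simp [pvGetI]

lemma left_eq (xs : List Int) (i dd : Int) (h1 : 1 ≤ i) (h2 : i < ↑xs.length - 1)
    (hn : 4 ≤ xs.length) :
    midLeft xs dd (i - 1)
      = if 2 ≤ i ∧ pvGetI (diffs xs) (i - 2) = dd then pvGetI (runs (diffs xs)) (i - 2) else 0 := by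
  have hlen := length_diffs xs
  by_cases hi : 2 ≤ i
  · set k : Nat := (i - 2).toNat with hkdef
    have hci : (i - 2 : Int) = ↑k := by omega
    have hk : k < (diffs xs).length := by omega
    have hca : (i - 1 : Int) = ↑(k + 1) := by omega
    rw [hca, midLeft_eq xs dd (k + 1) (by omega), hci, pvGetI_natCast, pvGetI_natCast,
        reverse_take_succ _ _ hk, runs_getD _ _ hk, reverse_take_succ _ _ hk]
    by_cases hx : (diffs xs).getD k 0 = dd
    · rw [if_pos ⟨hi, hx⟩, hx]
    · rw [if_neg (by tauto)]
      simp only [cwe, if_neg hx]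
      simp
  · have hca : (i - 1 : Int) = ↑(0 : Nat) := by omega
    rw [hca, midLeft_eq xs dd 0 (by omega), if_neg (by tauto)]
    simp [cwe]

lemma right_eq (xs : List Int) (i dd : Int) (h1 : 1 ≤ i) (h2 : i < ↑xs.length - 1)
    (hn : 4 ≤ xs.length) :
    midRight xs dd (i + 1)
      = if i ≤ ↑xs.length - 3 ∧ pvGetI (diffs xs) (i + 1) = dd
        then pvGetI ((runs (diffs xs).reverse).reverse) (i + 1) else 0 := by
  have hlen := length_diffs xs
  set k : Nat := (i + 1).toNat with hkdef
  have hci : (i + 1 : Int) = ↑k := by omega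
  rw [hci, midRight_eq xs dd k, pvGetI_natCast, pvGetI_natCast]
  by_cases hi : i ≤ ↑xs.length - 3
  · have hk : k < (diffs xs).length := by omega
    rw [S_getD _ _ hk, List.drop_eq_getElem_cons hk, ← List.getD_eq_getElem _ 0 hk]
    by_cases hx : (diffs xs).getD k 0 = dd
    · rw [if_pos ⟨hi, hx⟩, hx]
    · rw [if_neg (by tauto)]
      simp only [cwe, if_neg hx]
      simp
  · have hk : (diffs xs).length ≤ k := by omega
    rw [if_neg (by tauto), List.drop_eq_nil_of_le hk]
    simp [cwe]

def listMax : List Int → Int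
  | [] => 0
  | h :: t => t.foldl max h

lemma listMax_append_singleton (l : List Int) (x : Int) (hl : l ≠ []) :
    listMax (l ++ [x]) = max (listMax l) x := by
  cases l with
  | nil => simp at hl
  | cons h t => simp [listMax, List.foldl_append]

lemma maxE_getD (l : List Int) (hl : l ≠ []) :
    (PySem.List.max? l (fun y => y)).getD 0 = listMax l := by
  cases l with
  | nil => simp at hl
  | cons h t => rw [PySem.List.max?_id_cons]; rfl

lemma listMax_runs_pos (d : List Int) (hd : d ≠ []) : 1 ≤ listMax (runs d) := by
  cases d with
  | nil => simp at hd
  | cons v t =>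
    have : runs (v :: t) = 1 :: runsGo 1 (some v) t := by simp [runs, runsGo]
    rw [this]
    exact (PySem.List.le_foldl_max _ _).1

def lasStep (xs : List Int) (st : Int × Int × Int) (j : Int) : Int × Int × Int :=
  if ¬ (pvGetI xs j - pvGetI xs (j - 1) = pvGetI xs (st.2.1 + 1) - pvGetI xs st.2.1) then
    (max (j - st.2.1) st.1, j - 1, j)
  else (st.1, st.2.1, j)

lemma take_succ_getD (l : List Int) (k : Nat) (hk : k < l.length) :
    l.take (k + 1) = l.take k ++ [l.getD k 0] := by
  rw [List.take_succ_eq_append_getElem hk, List.getD_eq_getElem l 0 hk]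

lemma lasInv (xs : List Int) (hn : 4 ≤ xs.length) (t : Nat) (ht : t + 2 ≤ xs.length) :
    ∃ (maxL : Int) (iN : Nat),
      (PySem.List.pyRange 2 (↑t + 2) 1).foldl (lasStep xs) (2, 0, 0)
        = (maxL, (↑iN : Int), if t = 0 then 0 else (↑t + 1 : Int))
      ∧ iN + cwe ((diffs xs).getD t 0) (((diffs xs).take (t + 1)).reverse) = t + 1
      ∧ max maxL ((t : Int) + 2 - iN) = max 2 (1 + listMax ((runs (diffs xs)).take (t + 1))) := by
  have hlen := length_diffs xs
  have hrl : (runs (diffs xs)).length = (diffs xs).length := by simp [runs, length_runsGo]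
  induction t with
  | zero =>
    clear ht
    refine ⟨2, 0, ?_, ?_, ?_⟩
    · norm_num [PySem.List.pyRange]
    · have h0 : (0 : Nat) < (diffs xs).length := by omega
      rw [reverse_take_succ _ _ h0]
      simp [cwe]
    · have h0 : (0 : Nat) < (runs (diffs xs)).length := by omega
      have e0 : (runs (diffs xs)).take 1 = [(runs (diffs xs)).getD 0 0] := by
        rw [take_succ_getD _ 0 h0]; simp
      have e1 : (runs (diffs xs)).getD 0 0 = 1 := by
        rw [runs_getD _ 0 (by omega), reverse_take_succ _ _ (by omega)]
        simp [cwe]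
      rw [e0, e1]
      simp [listMax]
  | succ t ih =>
    obtain ⟨maxL, iN, heq, hrun, hmax⟩ := ih (by omega)
    clear ih
    have hdt : t + 1 < (diffs xs).length := by omega
    have hds : t < (diffs xs).length := by omega
    have hre : (PySem.List.pyRange 2 (↑(t + 1) + 2) 1)
        = (PySem.List.pyRange 2 (↑t + 2) 1) ++ [(↑t + 2 : Int)] := by
      have e : (↑(t + 1) + 2 : Int) = (↑t + 2) + 1 := by push_cast; ring
      rw [e, PySem.List.pyRange_one_succ_right (by omega)]
    set p := (diffs xs).getD t 0 with hp
    set r := cwe p (((diffs xs).take (t + 1)).reverse) with hrdef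
    have hrpos : 1 ≤ r := by
      rw [hrdef, reverse_take_succ _ _ hds, ← hp]
      simp [cwe]
    have hiN : iN ≤ t := by omega
    have hdiN : (diffs xs).getD iN 0 = p := by
      have h1 : t - iN < r := by omega
      have h2 := cwe_getD p (((diffs xs).take (t + 1)).reverse) (t - iN) (by omega)
      rwa [getD_reverse_take _ _ _ (by omega) hds, (by omega : t - (t - iN) = iN)] at h2
    rw [hre, List.foldl_append, heq]
    have hd1 : pvGetI xs (↑t + 2) - pvGetI xs ((↑t + 2) - 1) = (diffs xs).getD (t + 1) 0 := by
      have e : ((↑t + 2 : Int)) = ↑(t + 1) + 1 := by push_cast; ring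
      have e2 : ((↑t + 2 : Int)) - 1 = ↑(t + 1) := by push_cast; ring
      rw [e2, e, pvGetI_diff xs (t + 1) (by omega)]
    have hd2 : pvGetI xs ((↑iN : Int) + 1) - pvGetI xs ↑iN = (diffs xs).getD iN 0 :=
      pvGetI_diff xs iN (by omega)
    by_cases hc : (diffs xs).getD (t + 1) 0 = (diffs xs).getD iN 0
    · -- the current run continues: else branch of the loop body
      have hstep : lasStep xs (maxL, (↑iN : Int), if t = 0 then 0 else (↑t + 1 : Int)) (↑t + 2)
          = (maxL, (↑iN : Int), (↑t + 2 : Int)) := by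
        simp only [lasStep]
        rw [if_neg (by simp only [hd1, hd2, not_not]; exact hc)]
      rw [List.foldl_cons, List.foldl_nil, hstep]
      have hq : (diffs xs).getD (t + 1) 0 = p := by rw [hc, hdiN]
      refine ⟨maxL, iN, ?_, ?_, ?_⟩
      · have e : (↑(t + 1) + 1 : Int) = ↑t + 2 := by push_cast; ring
        simp only [Nat.succ_ne_zero, if_neg, reduceIte, e]
      · rw [reverse_take_succ _ _ hdt, hq]
        simp only [cwe, eq_self_iff_true, if_true, ← hrdef]
        omega
      · have hne : (runs (diffs xs)).take (t + 1) ≠ [] := by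
          have : ((runs (diffs xs)).take (t + 1)).length = t + 1 := by
            simp [hrl]; omega
          exact List.ne_nil_of_length_pos (by omega)
        have hE : (runs (diffs xs)).getD (t + 1) 0 = ((r + 1 : Nat) : Int) := by
          rw [runs_getD _ _ hdt, reverse_take_succ _ _ hdt, hq]
          simp only [cwe, eq_self_iff_true, if_true, ← hrdef]
        rw [take_succ_getD _ _ (by omega), hE, listMax_append_singleton _ _ hne]
        push_cast
        omega
    · -- the run is broken: then branch of the loop body
      have hstep : lasStep xs (maxL, (↑iN : Int), if t = 0 then 0 else (↑t + 1 : Int)) (↑t + 2)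
          = (max ((↑t + 2 : Int) - ↑iN) maxL, (↑t + 2 : Int) - 1, (↑t + 2 : Int)) := by
        simp only [lasStep]
        rw [if_pos (by simp only [hd1, hd2]; exact hc)]
      rw [List.foldl_cons, List.foldl_nil, hstep]
      have hq : (diffs xs).getD (t + 1) 0 ≠ p := by rw [← hdiN]; exact hc
      have hq' : ¬ (p = (diffs xs).getD (t + 1) 0) := fun h => hq h.symm
      refine ⟨max ((↑t + 2 : Int) - ↑iN) maxL, t + 1, ?_, ?_, ?_⟩
      · have e : (↑(t + 1) + 1 : Int) = ↑t + 2 := by push_cast; ring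
        have e2 : ((↑t + 2 : Int)) - 1 = ↑(t + 1) := by push_cast; ring
        simp only [Nat.succ_ne_zero, if_neg, reduceIte, e, e2]
      · rw [reverse_take_succ _ _ hdt, reverse_take_succ _ _ hds, ← hp]
        simp only [cwe, if_true, if_neg hq']
      · have hne : (runs (diffs xs)).take (t + 1) ≠ [] := by
          have : ((runs (diffs xs)).take (t + 1)).length = t + 1 := by
            simp [hrl]; omega
          exact List.ne_nil_of_length_pos (by omega)
        have hE : (runs (diffs xs)).getD (t + 1) 0 = 1 := by
          rw [runs_getD _ _ hdt, reverse_take_succ _ _ hdt, reverse_take_succ _ _ hds, ← hp]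
          simp only [cwe, if_true, if_neg hq']
          simp
        rw [take_succ_getD _ _ (by omega), hE, listMax_append_singleton _ _ hne]
        push_cast
        omega

lemma lasLoop_eq (xs : List Int) :
    lasLoop xs = (PySem.List.pyRange 2 (PySem.List.len xs) 1).foldl (lasStep xs) (2, 0, 0) := rfl

lemma las_eq (xs : List Int) (hn : 4 ≤ xs.length) :
    las xs = max 2 (1 + listMax (runs (diffs xs))) := by
  have hlen := length_diffs xs
  have hrl : (runs (diffs xs)).length = (diffs xs).length := by simp [runs, length_runsGo]
  obtain ⟨maxL, iN, heq, hrun, hmax⟩ := lasInv xs hn (xs.length - 2) (by omega)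
  have e : ((↑(xs.length - 2) : Int) + 2) = ↑xs.length := by omega
  rw [e] at heq
  have htake : (runs (diffs xs)).take (xs.length - 2 + 1) = runs (diffs xs) :=
    List.take_of_length_le (by omega)
  rw [htake] at hmax
  unfold las
  rw [lasLoop_eq, PySem.List.len_eq, heq]
  rw [if_neg (by omega)]
  have e2 : ((↑(xs.length - 2) : Int) + 1) + 1 - ↑iN = (↑(xs.length - 2) : Int) + 2 - ↑iN := by ring
  simp only [e2]
  exact hmax

lemma mid_eq (xs : List Int) (i : Int) (h1 : 1 ≤ i) (h2 : i < ↑xs.length - 1)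
    (hn : 4 ≤ xs.length) :
    midHelper xs i =
      (let dd := PySem.Int.floordiv (pvGetI xs (i + 1) - pvGetI xs (i - 1)) 2
       let c : Int := 3
       let c := if 2 ≤ i ∧ pvGetI (diffs xs) (i - 2) = dd then c + pvGetI (runs (diffs xs)) (i - 2) else c
       let c := if i ≤ ↑xs.length - 3 ∧ pvGetI (diffs xs) (i + 1) = dd
                then c + pvGetI ((runs (diffs xs).reverse).reverse) (i + 1) else c
       c) := by
  unfold midHelper
  simp only []
  rw [left_eq xs i _ h1 h2 hn, right_eq xs i _ h1 h2 hn]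
  split_ifs <;> ring

lemma max_ite (a c : Int) : max a c = if c > a then c else a := by
  by_cases h : a < c
  · simp [h, max_eq_right h.le]
  · simp [h, max_eq_left (not_lt.1 h)]

theorem final_eq (xs : List Int) : process xs = process_alt xs := by
  simp only [process, process_alt, PySem.List.len_eq]
  by_cases h : ((↑xs.length : Int) ≤ 3)
  · rw [if_pos h, if_pos h]
  · rw [if_neg h, if_neg h]
    have hn : 4 ≤ xs.length := by omega
    have hd : List.zipWith (fun a b => b - a) xs (List.drop 1 xs) = diffs xs := rfl
    rw [hd]
    have hrl : (runs (diffs xs)).length = (diffs xs).length := by simp [runs, length_runsGo]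
    have hdne : diffs xs ≠ [] := by
      apply List.ne_nil_of_length_pos; rw [length_diffs]; omega
    have hEne : runs (diffs xs) ≠ [] := by
      apply List.ne_nil_of_length_pos; rw [hrl, length_diffs]; omega
    have hinit : min ((↑xs.length : Int)) (las xs + 1)
        = min ((↑xs.length : Int)) ((PySem.List.max? (runs (diffs xs)) (fun x => x)).getD 0 + 2) := by
      rw [maxE_getD _ hEne, las_eq xs hn]
      have hL := listMax_runs_pos (diffs xs) hdne
      omega
    rw [hinit]
    apply PySem.List.foldl_congr_mem
    intro acc i hi
    have hmem := (PySem.List.mem_pyRange_one).1 hi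
    rw [mid_eq xs i hmem.1 (by omega) hn]
    simp only []
    exact max_ite acc _

-- ===== VERDICT (by name: the statement is the Claim_ definition above) =====
theorem process_spec : Claim_equal_process := by
  intro xs _
  unfold Spec_process
  exact final_eq xs
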